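-- pv_equiv track=rewrite | github.com/Saitharunmotipeta/Dyslexia-EmpowerHub | backend/app/insights/services/rag_service.py | extract_sound_units
-- ===== SOURCE A (Python) =====
-- def extract_sound_units(word: str):
--     word = word.lower()
--     units = []
--     i = 0
--
--     while i < len(word):
--         if i + 1 < len(word) and word[i:i+2] in ["th", "ph", "ch", "sh"]:
--             units.append(word[i:i+2])
--             i += 2
--         else:
--             units.append(word[i])
--             i += 1
--
--     return units
-- ===== SOURCE B (Python) =====
-- import re
--
-- _UNIT_RE = re.compile(r'th|ph|ch|sh|[\s\S]')
--
-- def extract_sound_units(word: str):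
--     return _UNIT_RE.findall(word.lower())
-- ===== Notes on version B (the rewrite author's own statement) =====
-- stated objective: idiomatic
-- what changed: Replaces the manual index-and-slice while loop with a single precompiled regex findall whose alternation tries the four digraphs before a catch-all [\s\S] character class.
import Mathlib
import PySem

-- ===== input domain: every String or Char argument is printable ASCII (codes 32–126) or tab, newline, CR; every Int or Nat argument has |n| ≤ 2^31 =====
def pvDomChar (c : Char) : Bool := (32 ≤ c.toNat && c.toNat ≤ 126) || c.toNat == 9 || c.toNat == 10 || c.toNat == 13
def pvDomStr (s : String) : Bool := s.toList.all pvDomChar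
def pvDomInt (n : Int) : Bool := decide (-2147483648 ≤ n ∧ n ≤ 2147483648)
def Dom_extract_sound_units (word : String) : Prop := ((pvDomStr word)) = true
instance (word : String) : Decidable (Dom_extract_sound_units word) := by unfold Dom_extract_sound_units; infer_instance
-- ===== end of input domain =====

-- B replaces A's index-and-slice while loop with a regex findall (digraphs first, then a
-- catch-all character class); same result, idiomatic one-liner in Python (a timing run measured it faster by a constant factor).

-- ===== PORT A =====
-- A's while loop over the lowercased word: index i, two-char slice tested against the digraph list.
def pvA_loop (cs : List Char) (i : Nat) : List String :=
  if _h : i < cs.length then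
    if i + 1 < cs.length ∧
        String.ofList (PySem.Chars.slice cs (some (i : Int)) (some ((i : Int) + 2)))
          ∈ ["th", "ph", "ch", "sh"] then
      String.ofList (PySem.Chars.slice cs (some (i : Int)) (some ((i : Int) + 2))) :: pvA_loop cs (i + 2)
    else
      String.ofList [cs[i]] :: pvA_loop cs (i + 1)
  else []
termination_by cs.length - i

def extract_sound_units (word : String) : List String :=
  pvA_loop (PySem.Chars.lower word.toList) 0

-- ===== PORT B =====
-- Port of Source B's regex r'th|ph|ch|sh|[\s\S]' applied by findall: at each position the
-- alternation first tries the four two-char digraph branches, else the one-char class matches.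
def pvB_scan (cs : List Char) : List String :=
  match cs with
  | a :: b :: rest =>
      if (a == 't' || a == 'p' || a == 'c' || a == 's') && b == 'h' then
        String.ofList [a, b] :: pvB_scan rest
      else
        String.ofList [a] :: pvB_scan (b :: rest)
  | [a] => [String.ofList [a]]
  | [] => []

def extract_sound_units_alt (word : String) : List String :=
  pvB_scan (PySem.Chars.lower word.toList)

-- ===== PRECONDITION & SPEC =====
def Spec_extract_sound_units (word : String) (out : List String) : Prop := out = extract_sound_units_alt word
instance (word : String) (out : List String) : Decidable (Spec_extract_sound_units word out) := by unfold Spec_extract_sound_units; infer_instance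

-- ===== CLAIM (what is proved, stated in full; the proofs are below) =====
def Claim_equal_extract_sound_units : Prop := ∀ (word : String), Dom_extract_sound_units word → Spec_extract_sound_units word (extract_sound_units word)

-- ===== LEMMAS AND PROOFS =====

-- the slice word[i:i+2] is the two characters at i and i+1 when both exist
theorem pv_slice_two (cs : List Char) (i : Nat) (h : i < cs.length) (h1 : i + 1 < cs.length) :
    PySem.Chars.slice cs (some (i : Int)) (some ((i : Int) + 2)) = [cs[i], cs[i+1]] := by
  have hslice : PySem.Chars.slice cs (some (i : Int)) (some ((i : Int) + 2))
      = (cs.drop i).take 2 := by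
    simpa using PySem.List.slice_natCast_add cs i 2
  rw [hslice, List.drop_eq_getElem_cons h, List.drop_eq_getElem_cons h1]
  rfl

-- A's loop from index i computes B's greedy scan of the remaining suffix
theorem pvA_loop_eq_scan (cs : List Char) (i : Nat) :
    pvA_loop cs i = pvB_scan (cs.drop i) := by
  induction i using pvA_loop.induct cs with
  | case1 i h hd ih =>
      rw [pvA_loop]
      simp only [dif_pos h, if_pos hd]
      obtain ⟨h1, hmem⟩ := hd
      have hdrop : cs.drop i = cs[i] :: cs[i+1] :: cs.drop (i + 2) := by
        rw [List.drop_eq_getElem_cons h]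
        congr 1
        rw [List.drop_eq_getElem_cons h1]
      rw [hdrop, pvB_scan, pv_slice_two cs i h h1] at *
      have hcond : ((cs[i] == 't' || cs[i] == 'p' || cs[i] == 'c' || cs[i] == 's')
          && (cs[i+1] == 'h')) = true := by
        simp only [List.mem_cons, List.not_mem_nil, or_false] at hmem
        rcases hmem with h' | h' | h' | h' <;>
          · have h2 := congrArg String.toList h'
            simp at h2
            simp [h2.1, h2.2]
      rw [if_pos hcond, ih]
  | case2 i h hd ih =>
      rw [pvA_loop]
      simp only [dif_pos h, if_neg hd]
      have hdrop : cs.drop i = cs[i] :: cs.drop (i + 1) := List.drop_eq_getElem_cons h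
      rw [ih, hdrop]
      cases hrest : cs.drop (i + 1) with
      | nil => simp [pvB_scan]
      | cons b rest =>
          have h1 : i + 1 < cs.length := by
            by_contra hc
            rw [List.drop_eq_nil_of_le (by omega)] at hrest
            simp at hrest
          have h2 := List.drop_eq_getElem_cons (l := cs) h1
          rw [hrest] at h2
          injection h2 with hb hr
          subst hb
          rw [pvB_scan]
          have hmem : String.ofList [cs[i], cs[i+1]] ∉ (["th", "ph", "ch", "sh"] : List String) := by
            intro hm
            exact hd ⟨h1, by rw [pv_slice_two cs i h h1]; exact hm⟩
          have hcond : ¬ (((cs[i] == 't' || cs[i] == 'p' || cs[i] == 'c' || cs[i] == 's')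
              && (cs[i+1] == 'h')) = true) := by
            intro hc
            apply hmem
            simp only [Bool.and_eq_true, Bool.or_eq_true, beq_iff_eq] at hc
            obtain ⟨hc1, hc2⟩ := hc
            rw [hc2]
            rcases hc1 with ((h' | h') | h') | h' <;> rw [h'] <;> decide
          rw [if_neg hcond]
  | case3 i h =>
      rw [pvA_loop, List.drop_eq_nil_of_le (by omega), pvB_scan]
      simp [h]

-- ===== VERDICT (by name: the statement is the Claim_ definition above) =====
theorem extract_sound_units_spec : Claim_equal_extract_sound_units := by
  intro word _
  unfold Spec_extract_sound_units extract_sound_units extract_sound_units_alt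
  simpa using pvA_loop_eq_scan (PySem.Chars.lower word.toList) 0
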